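-- pv_equiv track=rewrite | github.com/SgtApone117/leetcode_daily | 3001-apply-operations-to-maximize-score/apply-operations-to-maximize-score.py | maximumScore
-- ===== SOURCE A (Python) =====
-- import heapq
--
-- def maximumScore(nums, k):
--     mod = 10**9 + 7
--
--     # Step 1: Implement sieve algorithm to find smallest prime factors
--     max_num = max(nums)
--     spf = list(range(max_num + 1))
--     for i in range(2, int(max_num**0.5) + 1):
--         if spf[i] == i:  # i is prime
--             for j in range(i*i, max_num + 1, i):
--                 if spf[j] == j:
--                     spf[j] = i
--
--     # Step 2: Calculate prime score for each number
--     def get_prime_score(x):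
--         if x == 1:
--             return 0
--         factors = set()
--         while x > 1:
--             factors.add(spf[x])
--             x = x // spf[x]
--         return len(factors)
--
--     prime_scores = [get_prime_score(num) for num in nums]
--
--     # Step 3: Find subarray counts using monotonic stacks
--     n = len(nums)
--     left = [-1] * n
--     right = [n] * n
--     stack = []
--
--     # Find next greater element to the left
--     for i in range(n):
--         while stack and prime_scores[stack[-1]] < prime_scores[i]:
--             stack.pop()
--         if stack:
--             left[i] = stack[-1]
--         stack.append(i)
--
--     stack = []
--     # Find next greater or equal element to the right
--     for i in range(n-1, -1, -1):
--         while stack and prime_scores[stack[-1]] <= prime_scores[i]: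
--             stack.pop()
--         if stack:
--             right[i] = stack[-1]
--         stack.append(i)
--
--     # Calculate counts for each element
--     counts = [(right[i] - i) * (i - left[i]) for i in range(n)]
--
--     # Step 4: Use max-heap to select top elements
--     # Implement max-heap using min-heap with negative values
--     heap = []
--     for i in range(n):
--         heapq.heappush(heap, (-nums[i], counts[i]))
--
--     result = 1
--     while k > 0 and heap:
--         num, cnt = heapq.heappop(heap)
--         current_num = -num
--         use = min(cnt, k)
--         result = (result * pow(current_num, use, mod)) % mod
--         k -= use
--
--     return result
-- ===== SOURCE B (Python) =====
-- def maximumScore(nums, k):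
--     mod = 10**9 + 7
--
--     # Steps 1-2 as in A: sieve of smallest prime factors, then prime scores.
--     max_num = max(nums)
--     spf = list(range(max_num + 1))
--     for i in range(2, int(max_num**0.5) + 1):
--         if spf[i] == i:
--             for j in range(i*i, max_num + 1, i):
--                 if spf[j] == j:
--                     spf[j] = i
--
--     def get_prime_score(x):
--         if x == 1:
--             return 0
--         factors = set()
--         while x > 1:
--             factors.add(spf[x])
--             x = x // spf[x]
--         return len(factors)
--
--     prime_scores = [get_prime_score(num) for num in nums]
--
--     # Step 3: no stacks - expand each index directly to its dominated window.
--     n = len(nums)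
--     counts = []
--     for i in range(n):
--         l = i
--         while l > 0 and prime_scores[l - 1] < prime_scores[i]:
--             l -= 1
--         r = i + 1
--         while r < n and prime_scores[r] <= prime_scores[i]:
--             r += 1
--         counts.append((r - i) * (i - l + 1))
--
--     # Step 4: no heap - sort the (value, count) pairs once, best value first.
--     result = 1
--     for value, cnt in sorted(zip(nums, counts), key=lambda p: (-p[0], p[1])):
--         if k <= 0:
--             break
--         use = min(cnt, k)
--         result = result * pow(value, use, mod) % mod
--         k -= use
--     return result
-- ===== Notes on version B (the rewrite author's own statement) =====
-- stated objective: alternative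
-- what changed: B keeps A's sieve and prime-score steps but replaces the two monotonic-stack passes by a direct per-index left/right window expansion and replaces the negated-value min-heap by one descending sort of (value, count) pairs followed by a single greedy pass with early break.
import Mathlib
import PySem

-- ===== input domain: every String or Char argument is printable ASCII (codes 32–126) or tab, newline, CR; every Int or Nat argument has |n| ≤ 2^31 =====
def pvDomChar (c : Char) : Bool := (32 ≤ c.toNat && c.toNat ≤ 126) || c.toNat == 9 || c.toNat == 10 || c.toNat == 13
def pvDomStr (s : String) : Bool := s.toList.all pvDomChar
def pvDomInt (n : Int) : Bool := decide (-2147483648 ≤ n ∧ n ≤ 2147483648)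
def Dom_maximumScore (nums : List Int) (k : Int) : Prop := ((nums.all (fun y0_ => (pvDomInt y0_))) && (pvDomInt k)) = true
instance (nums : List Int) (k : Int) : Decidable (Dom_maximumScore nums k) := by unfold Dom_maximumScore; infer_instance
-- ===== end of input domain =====

-- B keeps A's sieve and prime scores but replaces the two monotonic-stack passes by direct
-- per-index window expansion and the heap by one sort of (value, count) pairs (objective: alternative).

-- ===== PORT A =====

-- Steps 1-2 are textually identical in Source A and Source B, so both ports share these two helpers.
-- Sieve of smallest prime factors.  'int(max_num**0.5)' is ported as Nat.sqrt: for 0 ≤ max_num ≤ 2^31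
-- the float sqrt is correctly rounded, so the two bounds differ by at most one trailing iteration
-- whose inner range is empty (i*i > max_num) and whose 'spf[i] == i' test touches an in-range index.
-- The Python list spf is represented as an Array; every access 'spf[x]' in Steps 1-2 uses an
-- in-range non-negative index (2 ≤ i ≤ sqrt(max_num), i*i ≤ j ≤ max_num, 1 < x ≤ max_num), so
-- 'spf[x]' is Array.getD x.toNat and 'spf[j] = i' is Array.set! (exact there).
def pvSieve (maxNum : Int) : Array Int :=
  let spf := (PySem.List.pyRange 0 (maxNum + 1) 1).toArray
  (PySem.List.pyRange 2 ((Nat.sqrt maxNum.toNat : Int) + 1) 1).foldl (fun spf i =>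
    if spf.getD i.toNat 0 = i then
      (PySem.List.pyRange (i * i) (maxNum + 1) i).foldl (fun spf j =>
        if spf.getD j.toNat 0 = j then spf.set! j.toNat i else spf) spf
    else spf) spf

-- 'while x > 1: factors.add(spf[x]); x = x // spf[x]'.  The fuel x.toNat bounds the loop:
-- for the real spf table each step divides x by its smallest prime factor ≥ 2, so Python's
-- loop makes at most log2(x) < x.toNat iterations; 'spf[x]' is in range there (x ≤ max_num).
def pvPrimeScoreLoop (spf : Array Int) : Nat → PySem.Set Int → Int → Int
  | 0, factors, _ => (factors.length : Int)
  | fuel + 1, factors, x =>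
    if 1 < x then
      pvPrimeScoreLoop spf fuel (PySem.Set.add factors (spf.getD x.toNat 0))
        (PySem.Int.floordiv x (spf.getD x.toNat 0))
    else (factors.length : Int)

def pvPrimeScore (spf : Array Int) (x : Int) : Int :=
  if x = 1 then 0 else pvPrimeScoreLoop spf x.toNat [] x

-- One step of A's first stack pass (stack kept top-first, so Python's append is cons and the
-- 'while stack and prime_scores[stack[-1]] < prime_scores[i]: stack.pop()' loop is dropWhile).
def pvLeftStep (ps : List Int) (st : List Int × List Nat) (i : Nat) : List Int × List Nat :=
  let stack' := st.2.dropWhile (fun (t : Nat) => decide (PySem.List.pyGetD ps (t : Int) 0 < PySem.List.pyGetD ps (i : Int) 0))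
  ((match stack' with
    | [] => st.1
    | t :: _ => st.1.set i ((t : Nat) : Int)), i :: stack')

-- One step of A's second stack pass (pops while '<=').
def pvRightStep (ps : List Int) (st : List Int × List Nat) (i : Nat) : List Int × List Nat :=
  let stack' := st.2.dropWhile (fun (t : Nat) => decide (PySem.List.pyGetD ps (t : Int) 0 ≤ PySem.List.pyGetD ps (i : Int) 0))
  ((match stack' with
    | [] => st.1
    | t :: _ => st.1.set i ((t : Nat) : Int)), i :: stack')

-- 'while k > 0 and heap: num, cnt = heapq.heappop(heap); ...'.  heapq is modelled at its
-- contract granularity: the heap is its list of entries and heappop removes the lexicographically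
-- minimal (-num, cnt) pair — exactly the value Python's heappop returns (ties are identical
-- pairs, so which occurrence is removed is unobservable).  Fuel = heap length: each pop removes one entry.
def pvPopLoop (M : Int) : Nat → Int → Int → List (Int × Int) → Int
  | 0, _, result, _ => result
  | fuel + 1, k, result, heap =>
    if 0 < k ∧ heap ≠ [] then
      match PySem.List.min? heap (fun q => toLex q) with
      | none => result
      | some m =>
        let currentNum := -m.1
        let use := min m.2 k
        pvPopLoop M fuel (k - use)
          (PySem.Int.mod (result * PySem.Int.powMod currentNum use.toNat M) M) (heap.erase m)
    else result

def maximumScore (nums : List Int) (k : Int) : Int :=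
  let M : Int := 10 ^ 9 + 7
  -- max(nums): Python raises ValueError on []; that input is outside Pre_maximumScore
  let maxNum := (PySem.List.max? nums (fun x => x)).getD 0
  let spf := pvSieve maxNum
  let primeScores := nums.map (pvPrimeScore spf)
  let n := nums.length
  let left := ((List.range n).foldl (pvLeftStep primeScores) (List.replicate n (-1), [])).1
  let right := ((List.range n).reverse.foldl (pvRightStep primeScores) (List.replicate n (n : Int), [])).1
  let counts := (List.range n).map (fun (i : Nat) =>
    (PySem.List.pyGetD right (i : Int) 0 - (i : Int)) * ((i : Int) - PySem.List.pyGetD left (i : Int) 0))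
  let heap := (List.range n).foldl
    (fun h (i : Nat) => h ++ [(-(PySem.List.pyGetD nums (i : Int) 0), PySem.List.pyGetD counts (i : Int) 0)]) []
  pvPopLoop M heap.length k 1 heap

-- ===== PORT B =====

-- 'l = i; while l > 0 and prime_scores[l-1] < prime_scores[i]: l -= 1'
def pvExpandLeft (ps : List Int) (pi : Int) : Nat → Nat
  | 0 => 0
  | l + 1 => if PySem.List.pyGetD ps (l : Int) 0 < pi then pvExpandLeft ps pi l else l + 1

-- 'r = i + 1; while r < n and prime_scores[r] <= prime_scores[i]: r += 1'  (fuel n suffices: r ≤ n)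
def pvExpandRight (ps : List Int) (pi : Int) (n : Nat) : Nat → Nat → Nat
  | 0, r => r
  | fuel + 1, r => if r < n ∧ PySem.List.pyGetD ps (r : Int) 0 ≤ pi then pvExpandRight ps pi n fuel (r + 1) else r

-- the 'for value, cnt in sorted(...)' loop with its 'if k <= 0: break'
def pvSellLoop (M : Int) : List (Int × Int) → Int → Int → Int
  | [], _, result => result
  | (v, c) :: rest, k, result =>
    if k ≤ 0 then result
    else
      let use := min c k
      pvSellLoop M rest (k - use) (PySem.Int.mod (result * PySem.Int.powMod v use.toNat M) M)

def maximumScore_alt (nums : List Int) (k : Int) : Int :=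
  let M : Int := 10 ^ 9 + 7
  let maxNum := (PySem.List.max? nums (fun x => x)).getD 0
  let spf := pvSieve maxNum
  let primeScores := nums.map (pvPrimeScore spf)
  let n := nums.length
  let counts := (List.range n).map (fun (i : Nat) =>
    let pi := PySem.List.pyGetD primeScores (i : Int) 0
    let l := pvExpandLeft primeScores pi i
    let r := pvExpandRight primeScores pi n n (i + 1)
    ((r : Int) - (i : Int)) * ((i : Int) - (l : Int) + 1))
  -- key=lambda p: (-p[0], p[1]) compares tuples lexicographically: key type Lex (Int × Int)
  pvSellLoop M (PySem.List.sorted (nums.zip counts) (fun p => toLex (-p.1, p.2)) false) k 1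

-- ===== PRECONDITION & SPEC =====

-- Pre_ excludes exactly the inputs where Python's A raises: max([]) is a ValueError and a
-- negative maximum makes int(max_num**0.5) a TypeError (complex); i.e. some element must be ≥ 0.
def Pre_maximumScore (nums : List Int) (k : Int) : Prop := ∃ x ∈ nums, 0 ≤ x
instance (nums : List Int) (k : Int) : Decidable (Pre_maximumScore nums k) := by
  unfold Pre_maximumScore; infer_instance

def pvWitness_maximumScore : List Int × Int := ([2, 3, 4], 3)

def Spec_maximumScore (nums : List Int) (k : Int) (out : Int) : Prop := out = maximumScore_alt nums k
instance (nums : List Int) (k : Int) (out : Int) : Decidable (Spec_maximumScore nums k out) := by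
  unfold Spec_maximumScore; infer_instance

-- ===== CLAIM (what is proved, stated in full; the proofs are below) =====
def Claim_equal_maximumScore : Prop := ∀ (nums : List Int) (k : Int), Dom_maximumScore nums k → Pre_maximumScore nums k → Spec_maximumScore nums k (maximumScore nums k)

-- ===== LEMMAS AND PROOFS =====

-- the stack contents after processing indices (most recent first) 'done'
def pvVis (cmpv : Nat → Nat → Bool) : List Nat → List Nat
  | [] => []
  | i :: rest => i :: (pvVis cmpv rest).dropWhile (fun t => cmpv t i)

-- the value A's stack pass stores for index i, read off the indices seen before i (most recent first)
def pvAns (cmpv : Nat → Nat → Bool) (d : Int) (i : Nat) (prior : List Nat) : Int :=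
  match prior.find? (fun t => ! cmpv t i) with
  | some t => (t : Int)
  | none => d

-- generic form of the two stack-pass steps
def pvGStep (cmpv : Nat → Nat → Bool) (st : List Int × List Nat) (i : Nat) : List Int × List Nat :=
  let stack' := st.2.dropWhile (fun (t : Nat) => cmpv t i)
  ((match stack' with
    | [] => st.1
    | t :: _ => st.1.set i ((t : Nat) : Int)), i :: stack')

theorem pvLeftStep_eq_gstep (ps : List Int) :
    pvLeftStep ps = pvGStep (fun t i => decide (PySem.List.pyGetD ps (t : Int) 0 < PySem.List.pyGetD ps (i : Int) 0)) := rfl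

theorem pvRightStep_eq_gstep (ps : List Int) :
    pvRightStep ps = pvGStep (fun t i => decide (PySem.List.pyGetD ps (t : Int) 0 ≤ PySem.List.pyGetD ps (i : Int) 0)) := rfl

theorem pv_dropWhile_dropWhile {α : Type} (p q : α → Bool) (l : List α)
    (h : ∀ a, q a = true → p a = true) :
    (l.dropWhile q).dropWhile p = l.dropWhile p := by
  induction l with
  | nil => rfl
  | cons a l ih =>
    by_cases hq : q a = true
    · rw [List.dropWhile_cons_of_pos hq, List.dropWhile_cons_of_pos (h a hq), ih]
    · rw [List.dropWhile_cons_of_neg hq]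

theorem pvVis_head (cmpv : Nat → Nat → Bool)
    (htr : ∀ a b c, cmpv a b = true → cmpv b c = true → cmpv a c = true)
    (rest : List Nat) (i : Nat) :
    ((pvVis cmpv rest).dropWhile (fun t => cmpv t i)).head? = rest.find? (fun t => ! cmpv t i) := by
  induction rest with
  | nil => rfl
  | cons j rest ih =>
    simp only [pvVis, List.find?]
    by_cases hj : cmpv j i = true
    · rw [List.dropWhile_cons_of_pos (by simpa using hj),
        pv_dropWhile_dropWhile (fun t => cmpv t i) (fun t => cmpv t j) _ (fun a ha => htr a j i ha hj), ih]
      simp [hj]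
    · rw [List.dropWhile_cons_of_neg (by simpa using hj)]
      simp [hj]

-- invariant of A's first (left) stack pass
theorem pvLeftPass_inv (cmpv : Nat → Nat → Bool)
    (htr : ∀ a b c, cmpv a b = true → cmpv b c = true → cmpv a c = true)
    (n : Nat) (d : Int) (m : Nat) :
    ((List.range m).foldl (pvGStep cmpv) (List.replicate n d, [])).2
        = pvVis cmpv (List.range m).reverse ∧
    ((List.range m).foldl (pvGStep cmpv) (List.replicate n d, [])).1.length = n ∧
    (∀ i, i < n →
      ((List.range m).foldl (pvGStep cmpv) (List.replicate n d, [])).1.getD i 0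
        = if i < m then pvAns cmpv d i (List.range i).reverse else d) := by
  induction m with
  | zero =>
    refine ⟨rfl, by simp, ?_⟩
    intro i hi
    simp [List.getD_eq_getElem?_getD, hi]
  | succ m ih =>
    obtain ⟨hS, hL, hA⟩ := ih
    rw [List.range_succ, List.foldl_append, List.foldl_cons, List.foldl_nil]
    set F := (List.range m).foldl (pvGStep cmpv) (List.replicate n d, []) with hF
    have hhead := pvVis_head cmpv htr (List.range m).reverse m
    rw [← hS] at hhead
    constructor
    · show m :: F.2.dropWhile (fun t => cmpv t m) = _
      rw [List.reverse_append, List.reverse_singleton, List.singleton_append, pvVis, hS]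
    constructor
    · show (match F.2.dropWhile (fun t => cmpv t m) with
        | [] => F.1
        | t :: _ => F.1.set m ((t : Nat) : Int)).length = n
      cases F.2.dropWhile (fun t => cmpv t m) with
      | nil => exact hL
      | cons t rest => simpa using hL
    · intro i hi
      show (match F.2.dropWhile (fun t => cmpv t m) with
        | [] => F.1
        | t :: _ => F.1.set m ((t : Nat) : Int)).getD i 0 = _
      cases hstk : F.2.dropWhile (fun t => cmpv t m) with
      | nil =>
        rw [hstk] at hhead
        simp only [List.head?_nil] at hhead
        by_cases him : i = m
        · subst him
          rw [hA i hi, if_neg (by omega), if_pos (by omega)]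
          simp only [pvAns, ← hhead]
        · rw [hA i hi]
          by_cases hlt : i < m
          · rw [if_pos hlt, if_pos (by omega)]
          · rw [if_neg hlt, if_neg (by omega)]
      | cons t rest =>
        rw [hstk] at hhead
        simp only [List.head?_cons] at hhead
        by_cases him : i = m
        · subst him
          rw [List.getD_eq_getElem?_getD, List.getElem?_set_self (by omega), Option.getD_some,
            if_pos (by omega)]
          simp only [pvAns, ← hhead]
        · rw [List.getD_eq_getElem?_getD, List.getElem?_set_ne (Ne.symm him),
            ← List.getD_eq_getElem?_getD, hA i hi]
          by_cases hlt : i < m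
          · rw [if_pos hlt, if_pos (by omega)]
          · rw [if_neg hlt, if_neg (by omega)]

-- invariant of A's second (right) stack pass, descending from n
theorem pvRightPass_aux (cmpv : Nat → Nat → Bool)
    (htr : ∀ a b c, cmpv a b = true → cmpv b c = true → cmpv a c = true)
    (n : Nat) (d : Int) :
    ∀ c m, m + c = n →
    ((List.range' m c).reverse.foldl (pvGStep cmpv) (List.replicate n d, [])).2
        = pvVis cmpv (List.range' m c) ∧
    ((List.range' m c).reverse.foldl (pvGStep cmpv) (List.replicate n d, [])).1.length = n ∧
    (∀ i, i < n →
      ((List.range' m c).reverse.foldl (pvGStep cmpv) (List.replicate n d, [])).1.getD i 0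
        = if m ≤ i then pvAns cmpv d i (List.range' (i + 1) (n - (i + 1))) else d) := by
  intro c
  induction c with
  | zero =>
    intro m hm
    refine ⟨rfl, by simp, ?_⟩
    intro i hi
    rw [if_neg (by omega)]
    simp [List.getD_eq_getElem?_getD, hi]
  | succ c ih =>
    intro m hm
    obtain ⟨hS, hL, hA⟩ := ih (m + 1) (by omega)
    rw [List.range'_succ, List.reverse_cons, List.foldl_append, List.foldl_cons, List.foldl_nil]
    set F := (List.range' (m + 1) c).reverse.foldl (pvGStep cmpv) (List.replicate n d, []) with hF
    have hhead := pvVis_head cmpv htr (List.range' (m + 1) c) m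
    rw [← hS] at hhead
    constructor
    · show m :: F.2.dropWhile (fun t => cmpv t m) = _
      rw [pvVis, hS]
    constructor
    · show (match F.2.dropWhile (fun t => cmpv t m) with
        | [] => F.1
        | t :: _ => F.1.set m ((t : Nat) : Int)).length = n
      cases F.2.dropWhile (fun t => cmpv t m) with
      | nil => exact hL
      | cons t rest => simpa using hL
    · intro i hi
      show (match F.2.dropWhile (fun t => cmpv t m) with
        | [] => F.1
        | t :: _ => F.1.set m ((t : Nat) : Int)).getD i 0 = _
      have hc : n - (m + 1) = c := by omega
      cases hstk : F.2.dropWhile (fun t => cmpv t m) with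
      | nil =>
        rw [hstk] at hhead
        simp only [List.head?_nil] at hhead
        by_cases him : i = m
        · subst him
          rw [hA i hi, if_neg (by omega), if_pos (by omega)]
          simp only [pvAns, hc, ← hhead]
        · rw [hA i hi]
          by_cases hle : m + 1 ≤ i
          · rw [if_pos hle, if_pos (by omega)]
          · rw [if_neg hle, if_neg (by omega)]
      | cons t rest =>
        rw [hstk] at hhead
        simp only [List.head?_cons] at hhead
        by_cases him : i = m
        · subst him
          rw [List.getD_eq_getElem?_getD, List.getElem?_set_self (by omega), Option.getD_some,
            if_pos (by omega)]
          simp only [pvAns, hc, ← hhead]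
        · rw [List.getD_eq_getElem?_getD, List.getElem?_set_ne (Ne.symm him),
            ← List.getD_eq_getElem?_getD, hA i hi]
          by_cases hle : m + 1 ≤ i
          · rw [if_pos hle, if_pos (by omega)]
          · rw [if_neg hle, if_neg (by omega)]

theorem pvRightPass_inv (cmpv : Nat → Nat → Bool)
    (htr : ∀ a b c, cmpv a b = true → cmpv b c = true → cmpv a c = true)
    (n : Nat) (d : Int) :
    ((List.range n).reverse.foldl (pvGStep cmpv) (List.replicate n d, [])).1.length = n ∧
    (∀ i, i < n →
      ((List.range n).reverse.foldl (pvGStep cmpv) (List.replicate n d, [])).1.getD i 0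
        = pvAns cmpv d i (List.range' (i + 1) (n - (i + 1)))) := by
  have h := pvRightPass_aux cmpv htr n d n 0 (by omega)
  rw [List.range_eq_range'] at *
  exact ⟨h.2.1, fun i hi => by rw [h.2.2 i hi, if_pos (by omega)]⟩

-- B's left while-loop in terms of find?
theorem pvExpandLeft_eq (ps : List Int) (pi : Int) (i : Nat) :
    pvExpandLeft ps pi i
      = match (List.range i).reverse.find? (fun (t : Nat) => ! decide (PySem.List.pyGetD ps (t : Int) 0 < pi)) with
        | some t => t + 1
        | none => 0 := by
  induction i with
  | zero => rfl
  | succ i ih =>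
    rw [List.range_succ, List.reverse_append, List.reverse_singleton, List.singleton_append,
      List.find?_cons]
    by_cases h : PySem.List.pyGetD ps (i : Int) 0 < pi
    · have hd : (!decide (PySem.List.pyGetD ps ((i : Nat) : Int) 0 < pi)) = false := by rw [decide_eq_true h]; rfl
      simp only [pvExpandLeft, if_pos h, ih, hd]
    · have hd : (!decide (PySem.List.pyGetD ps ((i : Nat) : Int) 0 < pi)) = true := by rw [decide_eq_false h]; rfl
      simp only [pvExpandLeft, if_neg h, hd]

-- B's right while-loop in terms of find?
theorem pvExpandRight_eq (ps : List Int) (pi : Int) (n : Nat) (fuel r : Nat)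
    (hr : r ≤ n) (hf : n - r ≤ fuel) :
    pvExpandRight ps pi n fuel r
      = match (List.range' r (n - r)).find? (fun (t : Nat) => ! decide (PySem.List.pyGetD ps (t : Int) 0 ≤ pi)) with
        | some t => t
        | none => n := by
  induction fuel generalizing r with
  | zero =>
    have hrn : r = n := by omega
    subst hrn
    simp [pvExpandRight]
  | succ fuel ih =>
    by_cases hlt : r < n
    · have hcr : n - r = (n - (r + 1)) + 1 := by omega
      rw [hcr, List.range'_succ, List.find?_cons]
      by_cases h : PySem.List.pyGetD ps (r : Int) 0 ≤ pi
      · have hd : (!decide (PySem.List.pyGetD ps ((r : Nat) : Int) 0 ≤ pi)) = false := by rw [decide_eq_true h]; rfl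
        simp only [pvExpandRight, if_pos (show r < n ∧ PySem.List.pyGetD ps ((r : Nat) : Int) 0 ≤ pi from ⟨hlt, h⟩), hd]
        exact ih (r + 1) (by omega) (by omega)
      · have hd : (!decide (PySem.List.pyGetD ps ((r : Nat) : Int) 0 ≤ pi)) = true := by rw [decide_eq_false h]; rfl
        simp only [pvExpandRight, if_neg (show ¬(r < n ∧ PySem.List.pyGetD ps ((r : Nat) : Int) 0 ≤ pi) from fun hc => h hc.2), hd]
    · have hrn : r = n := by omega
      subst hrn
      simp [pvExpandRight]

-- the head of the lex-sorted list is the first lex-minimal element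
theorem pv_sorted_cons_min (heap : List (Int × Int)) (m : Int × Int)
    (hmin : PySem.List.min? heap (fun q => toLex q) = some m) :
    PySem.List.sorted heap (fun q => toLex q) false
      = m :: PySem.List.sorted (heap.erase m) (fun q => toLex q) false := by
  apply PySem.List.eq_of_perm_of_pairwise_le_of_injective (fun q => toLex q)
  · intro a b h
    simpa using h
  · exact (PySem.List.sorted_perm _ _ _).trans
      ((List.perm_cons_erase (PySem.List.min?_mem hmin)).trans
        ((PySem.List.sorted_perm _ _ _).symm.cons m))
  · exact PySem.List.sorted_pairwise _ _
  · refine List.Pairwise.cons ?_ (PySem.List.sorted_pairwise _ _)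
    intro y hy
    exact PySem.List.min?_isMin hmin y (List.erase_subset ((PySem.List.mem_sorted _ _ _ _).mp hy))

-- pop-the-minimum loop = one pass over the lex-sorted list
theorem pvPopLoop_eq_sell (M : Int) (fuel : Nat) (heap : List (Int × Int)) (k r : Int)
    (hf : heap.length ≤ fuel) :
    pvPopLoop M fuel k r heap
      = pvSellLoop M ((PySem.List.sorted heap (fun q => toLex q) false).map (fun q => (-q.1, q.2))) k r := by
  induction fuel generalizing heap k r with
  | zero =>
    have hnil : heap = [] := List.eq_nil_of_length_eq_zero (by omega)
    subst hnil
    rfl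
  | succ fuel ih =>
    by_cases hh : heap = []
    · subst hh
      simp [pvPopLoop, pvSellLoop, PySem.List.sorted]
    by_cases hk : 0 < k
    · obtain ⟨m, hmin⟩ : ∃ m, PySem.List.min? heap (fun q => toLex q) = some m := by
        cases hm : PySem.List.min? heap (fun q => toLex q) with
        | none => exact absurd ((PySem.List.min?_eq_none_iff _ _).mp hm) hh
        | some m => exact ⟨m, rfl⟩
      have hsort := pv_sorted_cons_min heap m hmin
      have hlen : (heap.erase m).length ≤ fuel := by
        have := List.length_erase_of_mem (PySem.List.min?_mem hmin)
        have := List.length_pos_of_ne_nil hh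
        omega
      simp only [pvPopLoop, if_pos (And.intro hk hh), hmin]
      rw [ih (heap.erase m) _ _ hlen, hsort, List.map_cons]
      simp only [pvSellLoop, if_neg (by omega : ¬ k ≤ 0)]
    · have hk' : k ≤ 0 := by omega
      obtain ⟨m, t, hsort⟩ : ∃ m t, PySem.List.sorted heap (fun q => toLex q) false = m :: t := by
        cases hs : PySem.List.sorted heap (fun q => toLex q) false with
        | nil => exact absurd ((PySem.List.sorted_eq_nil_iff _ _ _).mp hs) hh
        | cons m t => exact ⟨m, t, rfl⟩
      rw [hsort, List.map_cons]
      simp only [pvPopLoop, pvSellLoop, if_neg (show ¬(0 < k ∧ heap ≠ []) from fun hc => hk hc.1), if_pos hk']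

theorem pv_sorted_map_neg (pairs : List (Int × Int)) :
    (PySem.List.sorted (pairs.map (fun p => (-p.1, p.2))) (fun q => toLex q) false).map (fun q => (-q.1, q.2))
      = PySem.List.sorted pairs (fun p => toLex (-p.1, p.2)) false := by
  apply PySem.List.eq_of_perm_of_pairwise_le_of_injective (fun p => toLex ((-p.1 : Int), (p.2 : Int)))
  · intro a b h
    simp only [toLex_inj, Prod.mk.injEq, neg_inj] at h
    exact Prod.ext h.1 h.2
  · refine (((PySem.List.sorted_perm _ _ _).map _).trans ?_).trans (PySem.List.sorted_perm _ _ _).symm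
    rw [List.map_map]
    have : ((fun q : Int × Int => (-q.1, q.2)) ∘ fun p : Int × Int => (-p.1, p.2)) = id := by
      funext p; simp
    rw [this, List.map_id]
  · have h := PySem.List.sorted_pairwise (pairs.map (fun p : Int × Int => (-p.1, p.2))) (fun q => toLex q)
    rw [List.pairwise_map]
    refine h.imp ?_
    intro a b hab
    simpa using hab
  · exact PySem.List.sorted_pairwise _ _

theorem pv_zip_eq_map_range (xs ys : List Int) (h : ys.length = xs.length) :
    xs.zip ys = (List.range xs.length).map
      (fun (i : Nat) => (PySem.List.pyGetD xs (i : Int) 0, PySem.List.pyGetD ys (i : Int) 0)) := by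
  apply List.ext_getElem
  · simp [h]
  · intro i h1 h2
    have hx : i < xs.length := by simp [h] at h1; omega
    have hy : i < ys.length := by omega
    rw [List.getElem_zip, List.getElem_map, List.getElem_range,
      PySem.List.pyGetD_natCast, PySem.List.pyGetD_natCast,
      List.getD_eq_getElem _ _ hx, List.getD_eq_getElem _ _ hy]

-- the two ports agree on every input (both are total functions of the list and k)
theorem pv_ports_agree (nums : List Int) (k : Int) :
    maximumScore nums k = maximumScore_alt nums k := by
  unfold maximumScore maximumScore_alt
  simp only []
  set ps := nums.map (pvPrimeScore (pvSieve ((PySem.List.max? nums fun x => x).getD 0))) with hps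
  set n := nums.length with hn
  set cmpL := fun t i : Nat =>
    decide (PySem.List.pyGetD ps (t : Int) 0 < PySem.List.pyGetD ps (i : Int) 0) with hcmpL
  set cmpR := fun t i : Nat =>
    decide (PySem.List.pyGetD ps (t : Int) 0 ≤ PySem.List.pyGetD ps (i : Int) 0) with hcmpR
  have htrL : ∀ a b c, cmpL a b = true → cmpL b c = true → cmpL a c = true := by
    intro a b c hab hbc
    rw [hcmpL] at *
    simp only [decide_eq_true_eq] at *
    omega
  have htrR : ∀ a b c, cmpR a b = true → cmpR b c = true → cmpR a c = true := by
    intro a b c hab hbc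
    rw [hcmpR] at *
    simp only [decide_eq_true_eq] at *
    omega
  obtain ⟨hLs, hLlen, hLval⟩ := pvLeftPass_inv cmpL htrL n (-1) n
  obtain ⟨hRlen, hRval⟩ := pvRightPass_inv cmpR htrR n ((n : Nat) : Int)
  rw [pvLeftStep_eq_gstep, pvRightStep_eq_gstep, ← hcmpL, ← hcmpR]
  have hcount :
      (List.range n).map (fun (i : Nat) =>
        (PySem.List.pyGetD ((List.range n).reverse.foldl (pvGStep cmpR) (List.replicate n ((n : Nat) : Int), [])).1 (i : Int) 0 - (i : Int)) *
        ((i : Int) - PySem.List.pyGetD ((List.range n).foldl (pvGStep cmpL) (List.replicate n (-1), [])).1 (i : Int) 0))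
      = (List.range n).map (fun (i : Nat) =>
        ((pvExpandRight ps (PySem.List.pyGetD ps (i : Int) 0) n n (i + 1) : Int) - (i : Int)) *
        ((i : Int) - (pvExpandLeft ps (PySem.List.pyGetD ps (i : Int) 0) i : Int) + 1)) := by
    apply List.map_congr_left
    intro i hmem
    have hi : i < n := List.mem_range.mp hmem
    rw [PySem.List.pyGetD_natCast, PySem.List.pyGetD_natCast, hLval i hi, if_pos hi, hRval i hi,
      pvExpandLeft_eq, pvExpandRight_eq ps _ n n (i + 1) (by omega) (by omega)]
    have hfoldL : (fun (t : Nat) =>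
        !decide (PySem.List.pyGetD ps (t : Int) 0 < PySem.List.pyGetD ps (i : Int) 0))
        = (fun t => ! cmpL t i) := rfl
    have hfoldR : (fun (t : Nat) =>
        !decide (PySem.List.pyGetD ps (t : Int) 0 ≤ PySem.List.pyGetD ps (i : Int) 0))
        = (fun t => ! cmpR t i) := rfl
    rw [hfoldL, hfoldR]
    rcases hfL : (List.range i).reverse.find? (fun t => ! cmpL t i) with _ | tl <;>
      rcases hfR : (List.range' (i + 1) (n - (i + 1))).find? (fun t => ! cmpR t i) with _ | tr <;>
      · simp only [pvAns, hfL, hfR]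
        push_cast
        ring
  rw [hcount]
  set countsB := (List.range n).map (fun (i : Nat) =>
    ((pvExpandRight ps (PySem.List.pyGetD ps (i : Int) 0) n n (i + 1) : Int) - (i : Int)) *
    ((i : Int) - (pvExpandLeft ps (PySem.List.pyGetD ps (i : Int) 0) i : Int) + 1)) with hcountsB
  have hlenB : countsB.length = nums.length := by rw [hcountsB]; simp [hn]
  have hheap : (List.range n).foldl
      (fun h (i : Nat) => h ++ [(-(PySem.List.pyGetD nums (i : Int) 0), PySem.List.pyGetD countsB (i : Int) 0)]) []
      = (nums.zip countsB).map (fun p => (-p.1, p.2)) := by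
    rw [PySem.List.foldl_append_singleton_eq_map
        (fun (i : Nat) => (-(PySem.List.pyGetD nums (i : Int) 0), PySem.List.pyGetD countsB (i : Int) 0)),
      List.nil_append, pv_zip_eq_map_range nums countsB hlenB, List.map_map, ← hn]
    rfl
  rw [hheap, pvPopLoop_eq_sell _ _ _ _ _ le_rfl, pv_sorted_map_neg]

-- ===== VERDICT (by name: the statement is the Claim_ definition above) =====
theorem maximumScore_spec : Claim_equal_maximumScore := by
  intro nums k _ _
  unfold Spec_maximumScore
  exact pv_ports_agree nums k
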